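-- pv_equiv track=rewrite | github.com/pradigmaz/md2docx | python/md2docx/parsers/preprocessor.py | fix_broken_table_lines
-- ===== SOURCE A (Python) =====
-- def fix_broken_table_lines(text: str) -> str:
--     """Fix table lines that were broken by text wrapping.
--
--     Some editors wrap long lines, breaking markdown tables.
--     This joins lines that appear to be continuations of table rows.
--     """
--     lines = text.split('\n')
--     fixed_lines = []
--     i = 0
--
--     while i < len(lines):
--         line = lines[i]
--
--         # Check if this looks like a table row (starts with |)
--         if line.strip().startswith('|'):
--             # A complete table row should end with |
--             # Keep joining lines until we get a complete row
--             while not line.rstrip().endswith('|') and i + 1 < len(lines):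
--                 next_line = lines[i + 1]
--                 # If next line starts with |, it's a new row, stop joining
--                 if next_line.strip().startswith('|'):
--                     break
--                 # If next line is empty, stop joining
--                 if not next_line.strip():
--                     break
--                 # Join the continuation
--                 line = line.rstrip() + next_line.lstrip()
--                 i += 1
--
--         fixed_lines.append(line)
--         i += 1
--
--     return '\n'.join(fixed_lines)
-- ===== SOURCE B (Python) =====
-- def _start(out, line):
--     """Begin processing a fresh line: open a pending row or emit it directly."""
--     if line.strip().startswith('|') and not line.rstrip().endswith('|'):
--         return line
--     out.append(line)
--     return None
--
--
-- def fix_broken_table_lines(text: str) -> str: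
--     """Fix table lines that were broken by text wrapping.
--
--     Single forward pass keeping the incomplete table row being assembled
--     in `pending` instead of index-based look-ahead.
--     """
--     out = []
--     pending = None
--     for line in text.split('\n'):
--         if pending is not None:
--             if line.strip().startswith('|') or not line.strip():
--                 out.append(pending)
--                 pending = _start(out, line)
--             else:
--                 merged = pending.rstrip() + line.lstrip()
--                 if merged.rstrip().endswith('|'):
--                     out.append(merged)
--                     pending = None
--                 else:
--                     pending = merged
--         else:
--             pending = _start(out, line)
--     if pending is not None:
--         out.append(pending)
--     return '\n'.join(out)
-- ===== Notes on version B (the rewrite author's own statement) =====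
-- stated objective: alternative
-- what changed: Replaces A's index-based outer loop with nested look-ahead joining by a single forward fold that carries the incomplete table row in a pending accumulator, flushing it when a new table-row line, a blank line, or a complete row is seen.
import Mathlib
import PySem

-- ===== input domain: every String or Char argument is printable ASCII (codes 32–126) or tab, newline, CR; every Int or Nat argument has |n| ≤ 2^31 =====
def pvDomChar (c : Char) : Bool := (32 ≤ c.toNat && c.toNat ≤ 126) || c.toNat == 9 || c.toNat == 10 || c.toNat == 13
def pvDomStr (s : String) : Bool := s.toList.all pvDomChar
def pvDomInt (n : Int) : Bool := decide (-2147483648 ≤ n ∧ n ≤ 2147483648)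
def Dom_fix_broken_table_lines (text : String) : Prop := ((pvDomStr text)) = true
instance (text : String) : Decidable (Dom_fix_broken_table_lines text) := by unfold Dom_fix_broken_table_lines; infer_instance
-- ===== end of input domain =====

-- B replaces A's index-based look-ahead joining with a single forward pass holding
-- the incomplete row in a `pending` accumulator (objective: alternative decomposition).

-- ===== PORT A =====
-- inner `while not line.rstrip().endswith('|') and i + 1 < len(lines)` loop of A:
-- returns the joined line and the remaining lines after the consumed continuations
def pvJoinA (line : String) : List String → String × List String
  | [] => (line, [])
  | n :: rs =>
    if PySem.Str.endswith (PySem.Str.rstrip line) "|" then (line, n :: rs)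
    else if PySem.Str.startswith (PySem.Str.strip n) "|" then (line, n :: rs)
    else if PySem.Str.strip n = "" then (line, n :: rs)
    else pvJoinA (PySem.Str.rstrip line ++ PySem.Str.lstrip n) rs

theorem pvJoinA_len (line : String) (rest : List String) :
    (pvJoinA line rest).2.length ≤ rest.length := by
  induction rest generalizing line with
  | nil => simp [pvJoinA]
  | cons n rs ih =>
    simp only [pvJoinA]
    split_ifs <;> simp
    exact le_trans (ih _) (Nat.le_succ _)

-- outer `while i < len(lines)` loop of A
def pvLoopA : List String → List String
  | [] => []
  | l :: rest =>
    if PySem.Str.startswith (PySem.Str.strip l) "|" then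
      let jr := pvJoinA l rest
      jr.1 :: pvLoopA jr.2
    else l :: pvLoopA rest
termination_by xs => xs.length
decreasing_by
  · exact Nat.lt_succ_of_le (pvJoinA_len _ _)
  · simp

-- split? is some here since the separator "\n" is nonempty
def fix_broken_table_lines (text : String) : String :=
  PySem.Str.join "\n" (pvLoopA ((PySem.Str.split? text "\n").getD []))

-- ===== PORT B =====
-- Source B's `_start`: open a pending row or emit the line directly
def pvStartB (out : List String) (line : String) : List String × Option String :=
  if PySem.Str.startswith (PySem.Str.strip line) "|" &&
     !(PySem.Str.endswith (PySem.Str.rstrip line) "|") then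
    (out, some line)
  else (out ++ [line], none)

-- Source B's loop body
def pvStepB (st : List String × Option String) (line : String) : List String × Option String :=
  match st.2 with
  | some p =>
    if PySem.Str.startswith (PySem.Str.strip line) "|" || PySem.Str.strip line = "" then
      pvStartB (st.1 ++ [p]) line
    else
      let merged := PySem.Str.rstrip p ++ PySem.Str.lstrip line
      if PySem.Str.endswith (PySem.Str.rstrip merged) "|" then (st.1 ++ [merged], none)
      else (st.1, some merged)
  | none => pvStartB st.1 line

def fix_broken_table_lines_alt (text : String) : String :=
  let r := ((PySem.Str.split? text "\n").getD []).foldl pvStepB ([], none)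
  PySem.Str.join "\n" (r.1 ++ r.2.toList)

-- ===== PRECONDITION & SPEC =====
def Spec_fix_broken_table_lines (text : String) (out : String) : Prop := out = fix_broken_table_lines_alt text
instance (text : String) (out : String) : Decidable (Spec_fix_broken_table_lines text out) := by unfold Spec_fix_broken_table_lines; infer_instance

-- ===== CLAIM (what is proved, stated in full; the proofs are below) =====
def Claim_equal_fix_broken_table_lines : Prop := ∀ (text : String), Dom_fix_broken_table_lines text → Spec_fix_broken_table_lines text (fix_broken_table_lines text)

-- ===== LEMMAS AND PROOFS =====

theorem pvJoinA_of_ends (line : String) (rest : List String)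
    (h : PySem.Chars.endswith (PySem.Chars.rstrip line.toList) ['|'] = true) :
    pvJoinA line rest = (line, rest) := by
  cases rest <;> simp [pvJoinA, h]

theorem pvFold_loop (lines : List String) : ∀ (out : List String) (p : Option String),
    (∀ q, p = some q → PySem.Str.endswith (PySem.Str.rstrip q) "|" = false) →
    (lines.foldl pvStepB (out, p)).1 ++ (lines.foldl pvStepB (out, p)).2.toList =
      out ++ (match p with
              | none => pvLoopA lines
              | some q => (pvJoinA q lines).1 :: pvLoopA (pvJoinA q lines).2) := by
  induction lines with
  | nil =>
    intro out p hp
    cases p with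
    | none => simp [pvLoopA]
    | some q => simp [pvJoinA, pvLoopA]
  | cons l rest ih =>
    intro out p hp
    have hnone : ∀ out' : List String,
        ((l :: rest).foldl pvStepB (out', none)).1 ++
          ((l :: rest).foldl pvStepB (out', none)).2.toList = out' ++ pvLoopA (l :: rest) := by
      intro out'
      simp only [List.foldl_cons]
      by_cases hs : PySem.Chars.startswith (PySem.Chars.strip l.toList) ['|'] = true
      · by_cases he : PySem.Chars.endswith (PySem.Chars.rstrip l.toList) ['|'] = true
        · have hstep : pvStepB (out', none) l = (out' ++ [l], none) := by
            simp [pvStepB, pvStartB, hs, he]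
          rw [hstep, ih (out' ++ [l]) none (by intro q h; cases h), pvLoopA]
          simp [hs, pvJoinA_of_ends l rest he]
        · have hstep : pvStepB (out', none) l = (out', some l) := by
            simp [pvStepB, pvStartB, hs, he]
          rw [hstep, ih out' (some l)
              (by intro q h; cases h; simpa using he), pvLoopA]
          simp [hs]
      · have hstep : pvStepB (out', none) l = (out' ++ [l], none) := by
          simp [pvStepB, pvStartB, hs]
        rw [hstep, ih (out' ++ [l]) none (by intro q h; cases h), pvLoopA]
        simp [hs]
    cases p with
    | none => exact hnone out
    | some q =>
      have hq : PySem.Chars.endswith (PySem.Chars.rstrip q.toList) ['|'] = false := by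
        simpa using hp q rfl
      by_cases hC : (PySem.Chars.startswith (PySem.Chars.strip l.toList) ['|'] ||
                      decide (PySem.Str.strip l = "")) = true
      · -- flush pending q, then start afresh on l (A stops joining at a '|' or blank line)
        have hstate : (l :: rest).foldl pvStepB (out, some q) =
            (l :: rest).foldl pvStepB (out ++ [q], none) := by
          simp only [List.foldl_cons]
          have : pvStepB (out, some q) l = pvStepB (out ++ [q], none) l := by
            simp only [pvStepB]
            rw [if_pos (by simpa using hC)]
          rw [this]
        rw [hstate, hnone (out ++ [q])]
        have hjoin : pvJoinA q (l :: rest) = (q, l :: rest) := by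
          rcases Bool.or_eq_true_iff.mp hC with h | h
          · simp [pvJoinA, hq, h]
          · have hb := of_decide_eq_true h
            have hs : PySem.Chars.startswith (PySem.Chars.strip l.toList) ['|'] = false := by
              have : PySem.Chars.strip l.toList = [] := by
                simpa using congrArg String.toList hb
              simp [this, PySem.Chars.startswith]
            simp [pvJoinA, hq, hs, hb]
        simp [hjoin]
      · -- merge l into the pending row
        simp only [Bool.or_eq_true, not_or, Bool.not_eq_true, decide_eq_true_eq] at hC
        obtain ⟨hs, hb⟩ := hC
        have hjoin : pvJoinA q (l :: rest) =
            pvJoinA (PySem.Str.rstrip q ++ PySem.Str.lstrip l) rest := by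
          simp [pvJoinA, hq, hs, hb]
        by_cases hm : PySem.Chars.endswith
            (PySem.Chars.rstrip (PySem.Chars.rstrip q.toList ++ PySem.Chars.lstrip l.toList))
            ['|'] = true
        · have hstep : pvStepB (out, some q) l =
              (out ++ [PySem.Str.rstrip q ++ PySem.Str.lstrip l], none) := by
            simp [pvStepB, hs, hb, hm]
          simp only [List.foldl_cons, hstep]
          rw [ih _ none (by intro q h; cases h), hjoin,
            pvJoinA_of_ends _ rest (by simpa using hm)]
          simp
        · have hstep : pvStepB (out, some q) l =
              (out, some (PySem.Str.rstrip q ++ PySem.Str.lstrip l)) := by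
            simp [pvStepB, hs, hb, hm]
          simp only [List.foldl_cons, hstep]
          rw [ih _ (some _) (by intro q h; cases h; simpa using hm), hjoin]

-- ===== VERDICT (by name: the statement is the Claim_ definition above) =====
theorem fix_broken_table_lines_spec : Claim_equal_fix_broken_table_lines := by
  intro text _
  unfold Spec_fix_broken_table_lines fix_broken_table_lines fix_broken_table_lines_alt
  have h := pvFold_loop ((PySem.Str.split? text "\n").getD []) [] none (by intro q h; cases h)
  simp only [List.nil_append] at h
  show PySem.Str.join "\n" (pvLoopA ((PySem.Str.split? text "\n").getD [])) =
    PySem.Str.join "\n"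
      ((((PySem.Str.split? text "\n").getD []).foldl pvStepB ([], none)).1 ++
        (((PySem.Str.split? text "\n").getD []).foldl pvStepB ([], none)).2.toList)
  rw [h]
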